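-- pv_equiv track=rewrite | github.com/subiyu/coding-test | dynamic-programming/멀리 뛰기.py | solution
-- ===== SOURCE A (Python) =====
-- def solution(n):
--     if n <= 2:
--         return n
--
--     answer = 0
--     dp = [0] * (n+1)
--
--     dp[1], dp[2] = 1, 2
--
--     for i in range(3, n+1):
--         dp[i] = (dp[i-1] + dp[i-2]) % 1234567
--
--     answer = dp[n]
--
--     return answer
-- ===== SOURCE B (Python) =====
-- def solution(n):
--     if n <= 2:
--         return n
--     M = 1234567
--
--     def fd(k):
--         # returns (F(k) % M, F(k+1) % M) for the standard Fibonacci F(0)=0, F(1)=1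
--         if k == 0:
--             return (0, 1)
--         a, b = fd(k // 2)
--         c = a * (2 * b - a) % M
--         d = (a * a + b * b) % M
--         if k % 2:
--             return (d, (c + d) % M)
--         return (c, d)
--
--     return fd(n + 1)[0]
-- ===== Notes on version B (the rewrite author's own statement) =====
-- stated objective: faster
-- what changed: Replaced the O(n) DP table filled by a linear loop with O(log n) fast-doubling of the Fibonacci recurrence (F(2k), F(2k+1) from F(k), F(k+1)) mod 1234567.
import Mathlib
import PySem

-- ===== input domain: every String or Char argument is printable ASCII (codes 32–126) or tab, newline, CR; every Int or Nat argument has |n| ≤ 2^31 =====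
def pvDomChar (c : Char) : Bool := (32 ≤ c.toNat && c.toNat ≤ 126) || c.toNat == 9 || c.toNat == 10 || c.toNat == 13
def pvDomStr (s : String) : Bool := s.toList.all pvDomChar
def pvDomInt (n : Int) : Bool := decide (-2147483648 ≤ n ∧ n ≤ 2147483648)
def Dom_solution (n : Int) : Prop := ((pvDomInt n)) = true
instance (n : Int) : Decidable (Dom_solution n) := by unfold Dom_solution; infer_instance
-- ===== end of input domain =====

-- B replaces A's linear DP table by fast doubling of the Fibonacci recurrence mod 1234567.

-- ===== PORT A =====
-- literal port of A: dp table of length n+1, dp[1]=1, dp[2]=2, dp[i]=(dp[i-1]+dp[i-2])%1234567.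
-- All indices used (1, 2, i-2..i with 3 ≤ i ≤ n) are nonnegative and in range, so pySetD/pyGetD are exact.
def solution (n : Int) : Int :=
  if n ≤ 2 then n
  else
    let dp0 : List Int := PySem.List.pyRepeat [0] (n + 1)
    let dp1 := PySem.List.pySetD (PySem.List.pySetD dp0 1 1) 2 2
    let dp2 := (PySem.List.pyRange 3 (n + 1) 1).foldl
      (fun dp i =>
        PySem.List.pySetD dp i
          (PySem.Int.mod (PySem.List.pyGetD dp (i - 1) 0 + PySem.List.pyGetD dp (i - 2) 0) 1234567))
      dp1
    PySem.List.pyGetD dp2 n 0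

-- ===== PORT B =====
-- fd k = (F(k) % M, F(k+1) % M) by fast doubling.  The Python argument k = n+1 ≥ 4 and all its
-- halvings are nonnegative ints, so Nat with Nat division/mod is an exact port of k // 2 and k % 2.
def fdAlt (k : Nat) : Int × Int :=
  if k = 0 then (0, 1)
  else
    let p := fdAlt (k / 2)
    let a := p.1
    let b := p.2
    let c := PySem.Int.mod (a * (2 * b - a)) 1234567
    let d := PySem.Int.mod (a * a + b * b) 1234567
    if k % 2 = 1 then (d, PySem.Int.mod (c + d) 1234567) else (c, d)
  termination_by k
  decreasing_by exact Nat.div_lt_self (Nat.pos_of_ne_zero (by assumption)) (by omega)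

def solution_alt (n : Int) : Int :=
  if n ≤ 2 then n
  else (fdAlt (n + 1).toNat).1

-- ===== PRECONDITION & SPEC =====
def Spec_solution (n : Int) (out : Int) : Prop := out = solution_alt n
instance (n : Int) (out : Int) : Decidable (Spec_solution n out) := by unfold Spec_solution; infer_instance

-- ===== CLAIM (what is proved, stated in full; the proofs are below) =====
def Claim_equal_solution : Prop := ∀ (n : Int), Dom_solution n → Spec_solution n (solution n)

-- ===== LEMMAS AND PROOFS =====

theorem pv_mod_eq (x : Int) : PySem.Int.mod x 1234567 = x % 1234567 :=
  PySem.Int.mod_eq_emod_of_pos (by norm_num)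

-- the three doubling-step congruences, written exactly as the port computes them
theorem step_c (j : Nat) :
    PySem.Int.mod ((Nat.fib j : Int) % 1234567 * (2 * ((Nat.fib (j+1) : Int) % 1234567) - (Nat.fib j : Int) % 1234567)) 1234567
      = ((Nat.fib (2 * j) : Int)) % 1234567 := by
  have hFle : Nat.fib j ≤ 2 * Nat.fib (j + 1) := le_trans Nat.fib_le_fib_succ (by omega)
  have h2m : ((Nat.fib (2 * j) : Int)) = (Nat.fib j : Int) * (2 * (Nat.fib (j+1) : Int) - (Nat.fib j : Int)) := by
    rw [Nat.fib_two_mul]; push_cast [Nat.cast_sub hFle]; ring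
  rw [pv_mod_eq, h2m]
  conv_rhs => rw [Int.mul_emod, Int.sub_emod, Int.mul_emod 2 ((Nat.fib (j+1) : Int))]
  rw [Int.mul_emod, Int.sub_emod, Int.mul_emod 2 ((Nat.fib (j+1) : Int) % 1234567)]
  simp [Int.emod_emod_of_dvd]

theorem step_d (j : Nat) :
    PySem.Int.mod ((Nat.fib j : Int) % 1234567 * ((Nat.fib j : Int) % 1234567) + (Nat.fib (j+1) : Int) % 1234567 * ((Nat.fib (j+1) : Int) % 1234567)) 1234567
      = ((Nat.fib (2 * j + 1) : Int)) % 1234567 := by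
  have h2m1 : ((Nat.fib (2 * j + 1) : Int)) = (Nat.fib j : Int) * (Nat.fib j : Int) + (Nat.fib (j+1) : Int) * (Nat.fib (j+1) : Int) := by
    rw [Nat.fib_two_mul_add_one]; push_cast; ring
  rw [pv_mod_eq, h2m1]
  conv_rhs => rw [Int.add_emod, Int.mul_emod, Int.mul_emod ((Nat.fib (j+1) : Int))]
  rw [Int.add_emod, Int.mul_emod, Int.mul_emod ((Nat.fib (j+1) : Int) % 1234567)]

theorem step_sum (j : Nat) :
    PySem.Int.mod (((Nat.fib (2 * j) : Int)) % 1234567 + ((Nat.fib (2 * j + 1) : Int)) % 1234567) 1234567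
      = ((Nat.fib (2 * j + 2) : Int)) % 1234567 := by
  rw [pv_mod_eq, ← Int.add_emod]
  have h : ((Nat.fib (2 * j + 2) : Int)) = (Nat.fib (2 * j) : Int) + (Nat.fib (2 * j + 1) : Int) := by
    rw [Nat.fib_add_two]; push_cast; ring
  rw [h]

-- B computes the Fibonacci pair mod 1234567
theorem fdAlt_eq (k : Nat) :
    fdAlt k = (((Nat.fib k : Int)) % 1234567, ((Nat.fib (k + 1) : Int)) % 1234567) := by
  induction k using Nat.strong_induction_on with
  | _ k ih =>
    rw [fdAlt]
    by_cases h0 : k = 0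
    · subst h0; simp
    · simp only [h0, if_false]
      rcases Nat.even_or_odd k with ⟨j, hk⟩ | ⟨j, hk⟩
      · subst hk
        have hdiv : (j + j) / 2 = j := by omega
        rw [hdiv, ih j (by omega)]
        rw [if_neg (show ¬ (j + j) % 2 = 1 by omega)]
        rw [show j + j = 2 * j from (two_mul j).symm]
        simp only [Prod.mk.injEq]
        exact ⟨step_c j, step_d j⟩
      · subst hk
        have hdiv : (2 * j + 1) / 2 = j := by omega
        rw [hdiv, ih j (by omega)]
        rw [if_pos (show (2 * j + 1) % 2 = 1 by omega)]
        simp only [Prod.mk.injEq]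
        refine ⟨step_d j, ?_⟩
        rw [step_c j, step_d j]
        exact step_sum j

-- the initial dp table of A, parametrised by m = n.toNat
def dpInit (m : Nat) : List Int :=
  ((List.replicate (m + 1) (0 : Int)).set 1 1).set 2 2

def dpStep (dp : List Int) (i : Int) : List Int :=
  PySem.List.pySetD dp i
    (PySem.Int.mod (PySem.List.pyGetD dp (i - 1) 0 + PySem.List.pyGetD dp (i - 2) 0) 1234567)

-- loop invariant: after processing i = 3 .. j, the table has length m+1 and carries
-- fib j % M at index j-1 and fib (j+1) % M at index j.
theorem loopA (m j : Nat) (h2 : 2 ≤ j) (hjm : j ≤ m) :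
    ((PySem.List.pyRange 3 ((j : Int) + 1) 1).foldl dpStep (dpInit m)).length = m + 1
    ∧ ((PySem.List.pyRange 3 ((j : Int) + 1) 1).foldl dpStep (dpInit m)).getD (j - 1) 0 = ((Nat.fib j : Int)) % 1234567
    ∧ ((PySem.List.pyRange 3 ((j : Int) + 1) 1).foldl dpStep (dpInit m)).getD j 0 = ((Nat.fib (j + 1) : Int)) % 1234567 := by
  induction j with
  | zero => omega
  | succ j ih =>
    by_cases hj2 : j < 2
    · -- base: j + 1 = 2, the loop range is empty
      have hj1 : j = 1 := by omega
      subst hj1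
      rw [PySem.List.pyRange_one_eq_nil (by norm_num)]
      simp only [List.foldl_nil]
      refine ⟨by simp [dpInit], ?_, ?_⟩
      · simp [dpInit, List.getD,
          show (1:ℕ) < m + 1 by omega]
      · simp [dpInit, List.getD,
          show (2:ℕ) < m + 1 by omega]
        decide
    · obtain ⟨hlen, hprev, hcur⟩ := ih (by omega) (by omega)
      have hsplit : PySem.List.pyRange 3 (((j + 1 : Nat) : Int) + 1) 1
          = PySem.List.pyRange 3 ((j : Int) + 1) 1 ++ [(j : Int) + 1] := by
        have h3 : (3 : Int) ≤ (j : Int) + 1 := by exact_mod_cast by omega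
        have := PySem.List.pyRange_one_succ_right h3
        push_cast
        convert this using 3
      rw [hsplit, List.foldl_append]
      set L := (PySem.List.pyRange 3 ((j : Int) + 1) 1).foldl dpStep (dpInit m) with hL
      simp only [List.foldl_cons, List.foldl_nil]
      have hi1 : ((j : Int) + 1 - 1) = ((j : Nat) : Int) := by push_cast; ring
      have hi2 : ((j : Int) + 1 - 2) = ((j - 1 : Nat) : Int) := by
        push_cast [Nat.cast_sub (show 1 ≤ j by omega)]; ring
      have hi0 : ((j : Int) + 1) = ((j + 1 : Nat) : Int) := by push_cast; ring
      unfold dpStep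
      rw [hi1, hi2, hi0, PySem.List.pySetD_natCast, PySem.List.pyGetD_natCast, PySem.List.pyGetD_natCast]
      have hjlt : j + 1 < L.length := by omega
      have hval : PySem.Int.mod (L.getD j 0 + L.getD (j - 1) 0) 1234567
          = ((Nat.fib (j + 2) : Int)) % 1234567 := by
        rw [hprev, hcur, pv_mod_eq, ← Int.add_emod]
        have h : ((Nat.fib (j + 2) : Int)) = (Nat.fib j : Int) + (Nat.fib (j + 1) : Int) := by
          rw [Nat.fib_add_two]; push_cast; ring
        rw [h]; congr 1; ring
      refine ⟨by simp [List.length_set, hlen], ?_, ?_⟩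
      · -- index (j+1)-1 = j, untouched by the write at j+1
        have hsub : j + 1 - 1 = j := by omega
        rw [hsub]
        simp only [List.getD, List.getElem?_set]
        rw [if_neg (by omega : ¬ j + 1 = j)]
        exact hcur
      · simp only [List.getD, List.getElem?_set, if_pos hjlt]
        simpa using hval

-- ===== VERDICT (by name: the statement is the Claim_ definition above) =====
theorem solution_spec : Claim_equal_solution := by
  intro n _
  unfold Spec_solution solution solution_alt
  by_cases hle : n ≤ 2
  · simp [hle]
  · simp only [hle, if_false]
    set m : Nat := n.toNat with hm
    have hn : n = (m : Int) := by omega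
    have hm3 : 3 ≤ m := by omega
    have hinit : PySem.List.pySetD (PySem.List.pySetD (PySem.List.pyRepeat [(0:Int)] (n + 1)) 1 1) 2 2
        = dpInit m := by
      rw [PySem.List.pyRepeat_singleton,
        PySem.List.pySetD_of_nonneg _ _ (by norm_num),
        PySem.List.pySetD_of_nonneg _ _ (by norm_num)]
      unfold dpInit
      rw [show ((1:Int)).toNat = 1 from rfl, show ((2:Int)).toNat = 2 from rfl,
        show (n + 1).toNat = m + 1 by omega]
    have hrange : n + 1 = ((m : Int) + 1) := by omega
    rw [hinit, hrange]
    obtain ⟨hlen, _, hcur⟩ := loopA m m (by omega) (le_refl m)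
    have hfold : (PySem.List.pyRange 3 ((m : Int) + 1) 1).foldl
        (fun dp i => PySem.List.pySetD dp i
          (PySem.Int.mod (PySem.List.pyGetD dp (i - 1) 0 + PySem.List.pyGetD dp (i - 2) 0) 1234567))
        (dpInit m)
        = (PySem.List.pyRange 3 ((m : Int) + 1) 1).foldl dpStep (dpInit m) := rfl
    rw [hfold, hn, PySem.List.pyGetD_natCast, hcur]
    rw [show ((m : Int) + 1).toNat = m + 1 by omega, fdAlt_eq]
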